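-- pv_equiv track=rewrite | github.com/fitz-s/openclaw-finance | scripts/source_roi_tracker.py | source_claim_refs
-- ===== SOURCE A (Python) =====
-- from typing import Any
--
-- def source_claim_refs(claim_graph: dict[str, Any], atoms: list[dict[str, Any]]) -> dict[str, list[str]]:
--     atom_to_source = {str(atom.get('atom_id')): str(atom.get('source_id') or 'source:unknown') for atom in atoms}
--     refs: dict[str, list[str]] = {}
--     for claim in claim_graph.get('claims', []) if isinstance(claim_graph.get('claims'), list) else []:
--         sid = atom_to_source.get(str(claim.get('atom_id')), 'source:unknown')
--         if claim.get('claim_id'):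
--             refs.setdefault(sid, []).append(str(claim['claim_id']))
--     return {sid: sorted(set(values)) for sid, values in refs.items()}
-- ===== SOURCE B (Python) =====
-- from typing import Any
--
-- def source_claim_refs(claim_graph: dict[str, Any], atoms: list[dict[str, Any]]) -> dict[str, list[str]]:
--     atom_to_source = {str(atom.get('atom_id')): str(atom.get('source_id') or 'source:unknown') for atom in atoms}
--     claims = claim_graph.get('claims')
--     if not isinstance(claims, list):
--         claims = []
--     pairs = [(atom_to_source.get(str(c.get('atom_id')), 'source:unknown'), str(c['claim_id']))
--              for c in claims if c.get('claim_id')]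
--     return {sid: sorted({c for s, c in pairs if s == sid})
--             for sid in dict.fromkeys(s for s, _ in pairs)}
-- ===== Notes on version B (the rewrite author's own statement) =====
-- stated objective: alternative
-- what changed: B replaces A's incremental dict-of-lists accumulation (setdefault+append then a sorted(set()) rewrite pass) by first flattening claims into a (source_id, claim_id) pair list, then grouping per first-occurrence source via dict.fromkeys plus a per-source set comprehension over the flat list.
import Mathlib
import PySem

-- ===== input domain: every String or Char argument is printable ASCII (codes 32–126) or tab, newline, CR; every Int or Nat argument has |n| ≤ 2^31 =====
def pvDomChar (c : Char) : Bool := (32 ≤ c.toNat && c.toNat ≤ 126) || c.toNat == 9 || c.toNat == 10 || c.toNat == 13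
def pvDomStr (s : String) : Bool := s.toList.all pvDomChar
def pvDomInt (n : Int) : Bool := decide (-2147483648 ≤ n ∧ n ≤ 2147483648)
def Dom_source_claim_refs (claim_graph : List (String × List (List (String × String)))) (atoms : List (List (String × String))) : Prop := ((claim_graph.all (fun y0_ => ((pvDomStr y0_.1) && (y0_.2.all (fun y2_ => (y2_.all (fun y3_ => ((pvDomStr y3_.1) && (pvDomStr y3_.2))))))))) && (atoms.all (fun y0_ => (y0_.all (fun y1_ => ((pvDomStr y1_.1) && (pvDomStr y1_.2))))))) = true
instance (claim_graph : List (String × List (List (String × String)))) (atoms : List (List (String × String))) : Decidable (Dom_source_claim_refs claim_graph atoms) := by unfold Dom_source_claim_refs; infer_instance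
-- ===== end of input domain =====

-- B replaces A's incremental dict-of-lists accumulation by a flat (source, claim) pair list that is
-- grouped afterwards (dict.fromkeys for key order, a per-key set comprehension for the values);
-- objective: alternative structure, same results.

-- ===== PORT A =====
-- str(x) for an optional string field: str(None) = "None"
def pvStrOfOpt (o : Option String) : String := o.getD "None"

-- str(atom.get('source_id') or 'source:unknown'): '' and None are falsy
def pvOrUnknown (o : Option String) : String :=
  match o with
  | some s => if s = "" then "source:unknown" else s
  | none => "source:unknown"

-- the dict comprehension both A and B start with (last occurrence wins = Dict.insert)
def pvAtomToSource (atoms : List (List (String × String))) : PySem.Dict String String :=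
  atoms.foldl
    (fun d atom =>
      d.insert (pvStrOfOpt ((PySem.Dict.mk atom).get? "atom_id"))
               (pvOrUnknown ((PySem.Dict.mk atom).get? "source_id")))
    PySem.Dict.empty

-- claim_graph.get('claims', []) if isinstance(..., list) else []  (typed input: a present value is a list)
def pvClaims (claim_graph : List (String × List (List (String × String)))) : List (List (String × String)) :=
  ((PySem.Dict.mk claim_graph).get? "claims").getD []

-- atom_to_source.get(str(claim.get('atom_id')), 'source:unknown')
def pvSid (a2s : PySem.Dict String String) (claim : List (String × String)) : String :=
  a2s.getD (pvStrOfOpt ((PySem.Dict.mk claim).get? "atom_id")) "source:unknown"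

def source_claim_refs (claim_graph : List (String × List (List (String × String)))) (atoms : List (List (String × String))) : List (String × List String) :=
  let atom_to_source := pvAtomToSource atoms
  let refs : PySem.Dict String (List String) :=
    (pvClaims claim_graph).foldl
      (fun refs claim =>
        let sid := pvSid atom_to_source claim
        match (PySem.Dict.mk claim).get? "claim_id" with
        | some cid => if cid = "" then refs else refs.modify sid [] (· ++ [cid])  -- setdefault(sid, []).append(cid)
        | none => refs)
      PySem.Dict.empty
  refs.items.map (fun p => (p.1, PySem.List.sorted (PySem.Set.ofList p.2) (fun x => x) false))

-- ===== PORT B =====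
-- the element of B's 'pairs' comprehension contributed by one claim (None = filtered out)
def pvPairOf (a2s : PySem.Dict String String) (claim : List (String × String)) : Option (String × String) :=
  match (PySem.Dict.mk claim).get? "claim_id" with
  | some cid => if cid = "" then none else some (pvSid a2s claim, cid)
  | none => none

def source_claim_refs_alt (claim_graph : List (String × List (List (String × String)))) (atoms : List (List (String × String))) : List (String × List String) :=
  let atom_to_source := pvAtomToSource atoms
  let pairs := (pvClaims claim_graph).filterMap (pvPairOf atom_to_source)
  (PySem.List.dedup (pairs.map Prod.fst)).map  -- dict.fromkeys(s for s, _ in pairs)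
    (fun sid =>
      (sid, PySem.List.sorted
              (PySem.Set.ofList ((pairs.filter (fun p => p.1 == sid)).map Prod.snd))  -- {c for s, c in pairs if s == sid}
              (fun x => x) false))

-- ===== PRECONDITION & SPEC =====
def Spec_source_claim_refs (claim_graph : List (String × List (List (String × String)))) (atoms : List (List (String × String))) (out : List (String × List String)) : Prop := out = source_claim_refs_alt claim_graph atoms
instance (claim_graph : List (String × List (List (String × String)))) (atoms : List (List (String × String))) (out : List (String × List String)) : Decidable (Spec_source_claim_refs claim_graph atoms out) := by unfold Spec_source_claim_refs; infer_instance

-- ===== CLAIM (what is proved, stated in full; the proofs are below) =====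
def Claim_equal_source_claim_refs : Prop := ∀ (claim_graph : List (String × List (List (String × String)))) (atoms : List (List (String × String))), Dom_source_claim_refs claim_graph atoms → Spec_source_claim_refs claim_graph atoms (source_claim_refs claim_graph atoms)

-- ===== LEMMAS AND PROOFS =====

-- fusing a fold whose body skips the `none` elements with filterMap
lemma foldl_filterMap_fuse {α β γ : Type} (f : α → Option β) (g : γ → β → γ) :
    ∀ (l : List α) (d : γ),
      l.foldl (fun acc x => match f x with | some y => g acc y | none => acc) d
        = (l.filterMap f).foldl g d := by
  intro l
  induction l with
  | nil => intro d; rfl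
  | cons x t ih =>
    intro d
    cases h : f x <;> simp [h, ih]

-- ===== VERDICT (by name: the statement is the Claim_ definition above) =====
theorem source_claim_refs_spec : Claim_equal_source_claim_refs := by
  intro claim_graph atoms _
  unfold Spec_source_claim_refs source_claim_refs source_claim_refs_alt
  simp only []
  set a2s := pvAtomToSource atoms with ha2s
  set pairs := (pvClaims claim_graph).filterMap (pvPairOf a2s) with hpairs
  -- A's fold equals the grouping fold over B's pair list
  have hfold :
      (pvClaims claim_graph).foldl
        (fun refs claim =>
          let sid := pvSid a2s claim
          match (PySem.Dict.mk claim).get? "claim_id" with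
          | some cid => if cid = "" then refs else refs.modify sid [] (· ++ [cid])
          | none => refs)
        PySem.Dict.empty
      = pairs.foldl (fun d p => d.modify p.1 [] (· ++ [p.2])) PySem.Dict.empty := by
    rw [hpairs, ← foldl_filterMap_fuse (pvPairOf a2s)
      (fun (d : PySem.Dict String (List String)) (p : String × String) => d.modify p.1 [] (· ++ [p.2]))]
    apply PySem.List.foldl_congr_mem
    intro d claim _
    unfold pvPairOf
    cases h : (PySem.Dict.mk claim).get? "claim_id" with
    | none => simp
    | some cid => by_cases hc : cid = "" <;> simp [hc]
  rw [hfold]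
  set refs := pairs.foldl (fun d p => d.modify p.1 [] (· ++ [p.2])) PySem.Dict.empty with hrefs
  have hnd : refs.keys.Nodup := by
    rw [hrefs]
    exact PySem.Dict.nodup_keys_foldl_modify_key pairs Prod.fst [] (fun _ p => (· ++ [p.2]))
      PySem.Dict.empty PySem.Dict.nodup_keys_empty
  have hkeys : refs.keys = PySem.Set.ofList (pairs.map Prod.fst) := by
    rw [hrefs, PySem.Dict.keys_foldl_modify_key, PySem.Dict.keys_empty, PySem.Set.update_nil_left]
  have hgetD : ∀ k, refs.getD k [] = (pairs.filter (fun p => p.1 == k)).map Prod.snd := by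
    intro k
    rw [hrefs, PySem.Dict.getD_foldl_modify_append, PySem.Dict.getD_empty]
    simp
  rw [PySem.Dict.items_eq_map_keys refs hnd [], hkeys, PySem.List.dedup_eq_ofList, List.map_map]
  refine List.map_congr_left (fun k _ => ?_)
  simp [hgetD k]
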